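-- pv_equiv track=rewrite | github.com/IrmaGC/Mision-09 | Mision_09.py | intercambiarMM
-- ===== SOURCE A (Python) =====
-- def intercambiarMM(lista): #en la lista recibida intecambia de ligar el digito mayor y el menor
--     #si hay más de un elemento en la lista
--     if len(lista)>0:
--         #Obtener el elemento mayor y menos de la lista
--         mayor=max(lista)
--         menor=min(lista)
--         for k in range (len(lista)):
--             #visita cada elemento de la lista y cuando encuentra el valor que coincide con el valor mayor, termina el ciclo
--             if lista[k]==mayor:
--                 break
--         for j in range (len(lista)):
--             # visita cada elemento de la lista y cuando encuentra el valor que coincide con el valor menor, termina el ciclo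
--             if lista[j]==menor:
--                 break
--         lista[k]= menor  #a la posición donde se encuentra el mayor se le asigna el menor
--         lista[j]= mayor  #a la posición donde se encuentra el menor se le asigna el mayor
--
--     return lista
-- ===== SOURCE B (Python) =====
-- def intercambiarMM(lista):
--     # Single pass tracking first max/min with their indices, then swap in place.
--     if len(lista) > 0:
--         maxval = minval = lista[0]
--         maxidx = minidx = 0
--         for i in range(1, len(lista)):
--             v = lista[i]
--             if v > maxval:
--                 maxval, maxidx = v, i
--             if v < minval:
--                 minval, minidx = v, i
--         lista[maxidx] = minval
--         lista[minidx] = maxval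
--     return lista
-- ===== Notes on version B (the rewrite author's own statement) =====
-- stated objective: alternative
-- what changed: Replaces max()+min() plus two separate first-match index scans (four passes) with one fused pass that tracks the running max/min values and their first indices.
import Mathlib
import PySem

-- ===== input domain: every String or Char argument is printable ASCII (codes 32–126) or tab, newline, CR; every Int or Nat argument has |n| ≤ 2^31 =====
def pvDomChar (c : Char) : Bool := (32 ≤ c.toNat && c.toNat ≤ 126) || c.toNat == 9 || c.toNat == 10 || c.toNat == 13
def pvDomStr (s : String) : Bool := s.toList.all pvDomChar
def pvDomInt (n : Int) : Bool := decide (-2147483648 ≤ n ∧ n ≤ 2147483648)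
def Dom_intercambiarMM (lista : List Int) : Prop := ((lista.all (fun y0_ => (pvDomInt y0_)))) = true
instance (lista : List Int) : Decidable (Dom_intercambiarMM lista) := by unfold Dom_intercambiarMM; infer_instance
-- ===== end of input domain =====

-- B fuses A's four passes (max(), min(), two index scans) into one pass tracking
-- running max/min values with their first indices; same in-place swap mutation as A.


-- ===== PORT A =====
-- 'for k in range(len(lista)): if lista[k]==t: break' — k ends at the first match,
-- or at the last index if there is no match (the loop guard len(lista)>0 guarantees the list is nonempty).
def pvScanIdxA (l : List Int) (t : Int) : Nat :=
  match l with
  | [] => 0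
  | [_] => 0
  | x :: rest => if x = t then 0 else pvScanIdxA rest t + 1

def intercambiarMM (lista : List Int) : List Int :=
  if lista.length > 0 then
    match PySem.List.max? lista (fun y => y), PySem.List.min? lista (fun y => y) with
    | some mayor, some menor =>
        let k := pvScanIdxA lista mayor
        let j := pvScanIdxA lista menor
        ((lista.set k menor).set j mayor)
    | _, _ => lista
  else lista

-- ===== PORT B =====
-- the single for-loop of Source B: state (maxval, maxidx, minval, minidx), index i runs over the tail
def pvScanB (l : List Int) (i : Nat) (st : Int × Nat × Int × Nat) : Int × Nat × Int × Nat :=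
  match l with
  | [] => st
  | v :: rest =>
      let (maxv, maxi, minv, mini) := st
      let st1 := if v > maxv then (v, i) else (maxv, maxi)
      let st2 := if v < minv then (v, i) else (minv, mini)
      pvScanB rest (i + 1) (st1.1, st1.2, st2.1, st2.2)

def intercambiarMM_alt (lista : List Int) : List Int :=
  match lista with
  | [] => lista
  | x :: rest =>
      let (maxv, maxi, minv, mini) := pvScanB rest 1 (x, 0, x, 0)
      ((lista.set maxi minv).set mini maxv)

-- ===== PRECONDITION & SPEC =====
def Spec_intercambiarMM (lista : List Int) (out : List Int) : Prop := out = intercambiarMM_alt lista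
instance (lista : List Int) (out : List Int) : Decidable (Spec_intercambiarMM lista out) := by unfold Spec_intercambiarMM; infer_instance

-- ===== CLAIM (what is proved, stated in full; the proofs are below) =====
def Claim_equal_intercambiarMM : Prop := ∀ (lista : List Int), Dom_intercambiarMM lista → Spec_intercambiarMM lista (intercambiarMM lista)

-- ===== LEMMAS AND PROOFS =====

-- running max / min of a nonempty list x :: t
def pvMaxOf (x : Int) (t : List Int) : Int := t.foldl max x
def pvMinOf (x : Int) (t : List Int) : Int := t.foldl min x

lemma le_pvMaxOf (x : Int) (t : List Int) : x ≤ pvMaxOf x t ∧ ∀ a ∈ t, a ≤ pvMaxOf x t := by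
  induction t generalizing x with
  | nil => simp [pvMaxOf]
  | cons y ys ih =>
    obtain ⟨h1, h2⟩ := ih (max x y)
    refine ⟨le_trans (le_max_left _ _) h1, ?_⟩
    intro a ha
    rcases List.mem_cons.mp ha with ha | ha
    · subst ha; exact le_trans (le_max_right x a) h1
    · exact h2 a ha

lemma pvMinOf_le (x : Int) (t : List Int) : pvMinOf x t ≤ x ∧ ∀ a ∈ t, pvMinOf x t ≤ a := by
  induction t generalizing x with
  | nil => simp [pvMinOf]
  | cons y ys ih =>
    obtain ⟨h1, h2⟩ := ih (min x y)
    refine ⟨le_trans h1 (min_le_left _ _), ?_⟩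
    intro a ha
    rcases List.mem_cons.mp ha with ha | ha
    · subst ha; exact le_trans h1 (min_le_right x a)
    · exact h2 a ha

lemma pvMaxOf_mem (x : Int) (t : List Int) : pvMaxOf x t ∈ x :: t := by
  induction t generalizing x with
  | nil => simp [pvMaxOf]
  | cons y ys ih =>
    have h := ih (max x y)
    have hv : pvMaxOf x (y :: ys) = pvMaxOf (max x y) ys := rfl
    rw [hv]
    rcases List.mem_cons.mp h with h | h
    · rw [h]
      rcases max_choice x y with hc | hc <;> rw [hc] <;> simp
    · simp [h]

lemma pvMinOf_mem (x : Int) (t : List Int) : pvMinOf x t ∈ x :: t := by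
  induction t generalizing x with
  | nil => simp [pvMinOf]
  | cons y ys ih =>
    have h := ih (min x y)
    have hv : pvMinOf x (y :: ys) = pvMinOf (min x y) ys := rfl
    rw [hv]
    rcases List.mem_cons.mp h with h | h
    · rw [h]
      rcases min_choice x y with hc | hc <;> rw [hc] <;> simp
    · simp [h]

lemma pvMaxOf_append (x : Int) (t : List Int) (v : Int) :
    pvMaxOf x (t ++ [v]) = if v > pvMaxOf x t then v else pvMaxOf x t := by
  simp only [pvMaxOf, List.foldl_append, List.foldl_cons, List.foldl_nil]
  rcases le_total v (List.foldl max x t) with h | h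
  · simp [max_eq_left h, not_lt.mpr h]
  · rcases lt_or_eq_of_le h with h' | h'
    · simp [max_eq_right h, h']
    · simp [← h']

lemma pvMinOf_append (x : Int) (t : List Int) (v : Int) :
    pvMinOf x (t ++ [v]) = if v < pvMinOf x t then v else pvMinOf x t := by
  simp only [pvMinOf, List.foldl_append, List.foldl_cons, List.foldl_nil]
  rcases le_total (List.foldl min x t) v with h | h
  · simp [min_eq_left h, not_lt.mpr h]
  · rcases lt_or_eq_of_le h with h' | h'
    · simp [min_eq_right h, h']
    · simp [h']

lemma pvScanIdxA_eq_findIdx (l : List Int) (t : Int) (h : t ∈ l) :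
    pvScanIdxA l t = l.findIdx (fun v => v = t) := by
  induction l with
  | nil => cases h
  | cons x rest ih =>
    cases rest with
    | nil =>
      simp only [List.mem_singleton] at h
      simp [pvScanIdxA, List.findIdx_cons, h]
    | cons y ys =>
      by_cases hx : x = t
      · simp [pvScanIdxA, List.findIdx_cons, hx]
      · rcases List.mem_cons.mp h with h | h
        · exact absurd h.symm hx
        · have hr : List.findIdx (fun v => decide (v = t)) (x :: y :: ys)
              = List.findIdx (fun v => decide (v = t)) (y :: ys) + 1 := by
            rw [List.findIdx_cons]
            simp [hx]
          have hu : pvScanIdxA (x :: y :: ys) t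
              = if x = t then 0 else pvScanIdxA (y :: ys) t + 1 := rfl
          rw [hr, hu, if_neg hx, ih h]

lemma findIdx_append_of_not_mem (l : List Int) (t : Int) (h : t ∉ l) (l2 : List Int) :
    (l ++ l2).findIdx (fun v => v = t) = l.length + l2.findIdx (fun v => v = t) := by
  induction l with
  | nil => simp
  | cons x rest ih =>
    simp only [List.mem_cons, not_or] at h
    have hx : ¬ x = t := fun e => h.1 e.symm
    simp [List.findIdx_cons, hx, ih h.2]
    omega

lemma findIdx_append_of_mem (l : List Int) (t : Int) (h : t ∈ l) (l2 : List Int) :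
    (l ++ l2).findIdx (fun v => v = t) = l.findIdx (fun v => v = t) := by
  induction l with
  | nil => cases h
  | cons x rest ih =>
    by_cases hx : x = t
    · simp [List.findIdx_cons, hx]
    · rcases List.mem_cons.mp h with h | h
      · exact absurd h.symm hx
      · simp [List.findIdx_cons, hx, ih h]

-- one step of B's loop advances the invariant from prefix x :: p to prefix x :: (p ++ [v])
lemma max_pair_step (x v : Int) (p : List Int) :
    (if v > pvMaxOf x p then ((v : Int), (x :: p).length)
     else (pvMaxOf x p, (x :: p).findIdx (fun w => w = pvMaxOf x p)))
    = (pvMaxOf x (p ++ [v]), (x :: (p ++ [v])).findIdx (fun w => w = pvMaxOf x (p ++ [v]))) := by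
  have hx : x :: (p ++ [v]) = (x :: p) ++ [v] := by simp
  by_cases hM : v > pvMaxOf x p
  · have hnot : v ∉ x :: p := by
      intro hmem
      rcases List.mem_cons.mp hmem with h | h
      · exact absurd (le_pvMaxOf x p).1 (not_le.mpr (h ▸ hM))
      · exact absurd ((le_pvMaxOf x p).2 v h) (not_le.mpr hM)
    rw [if_pos hM, pvMaxOf_append, if_pos hM, hx, findIdx_append_of_not_mem _ _ hnot]
    simp [List.findIdx_cons]
  · rw [if_neg hM, pvMaxOf_append, if_neg hM, hx, findIdx_append_of_mem _ _ (pvMaxOf_mem x p)]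

lemma min_pair_step (x v : Int) (p : List Int) :
    (if v < pvMinOf x p then ((v : Int), (x :: p).length)
     else (pvMinOf x p, (x :: p).findIdx (fun w => w = pvMinOf x p)))
    = (pvMinOf x (p ++ [v]), (x :: (p ++ [v])).findIdx (fun w => w = pvMinOf x (p ++ [v]))) := by
  have hx : x :: (p ++ [v]) = (x :: p) ++ [v] := by simp
  by_cases hm : v < pvMinOf x p
  · have hnot : v ∉ x :: p := by
      intro hmem
      rcases List.mem_cons.mp hmem with h | h
      · exact absurd (pvMinOf_le x p).1 (not_le.mpr (h ▸ hm))
      · exact absurd ((pvMinOf_le x p).2 v h) (not_le.mpr hm)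
    rw [if_pos hm, pvMinOf_append, if_pos hm, hx, findIdx_append_of_not_mem _ _ hnot]
    simp [List.findIdx_cons]
  · rw [if_neg hm, pvMinOf_append, if_neg hm, hx, findIdx_append_of_mem _ _ (pvMinOf_mem x p)]

-- the loop invariant of B's single pass
lemma pvScanB_spec (l : List Int) (x : Int) (p : List Int) :
    pvScanB l (x :: p).length
      (pvMaxOf x p, (x :: p).findIdx (fun w => w = pvMaxOf x p),
       pvMinOf x p, (x :: p).findIdx (fun w => w = pvMinOf x p)) =
      (pvMaxOf x (p ++ l), (x :: (p ++ l)).findIdx (fun w => w = pvMaxOf x (p ++ l)),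
       pvMinOf x (p ++ l), (x :: (p ++ l)).findIdx (fun w => w = pvMinOf x (p ++ l))) := by
  induction l generalizing p with
  | nil => simp [pvScanB]
  | cons v rest ih =>
    have hstep := ih (p ++ [v])
    have hlen : (x :: (p ++ [v])).length = (x :: p).length + 1 := by simp
    have hassoc : (p ++ [v]) ++ rest = p ++ v :: rest := by simp
    rw [hlen, hassoc] at hstep
    rw [pvScanB]
    simp only [max_pair_step x v p, min_pair_step x v p]
    exact hstep

-- ===== VERDICT (by name: the statement is the Claim_ definition above) =====
theorem intercambiarMM_spec : Claim_equal_intercambiarMM := by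
  intro lista _
  unfold Spec_intercambiarMM
  cases lista with
  | nil => rfl
  | cons x rest =>
    have hscan := pvScanB_spec rest x []
    have h0 : pvMaxOf x [] = x := rfl
    have h0' : pvMinOf x [] = x := rfl
    have hfi : List.findIdx (fun w => decide (w = x)) [x] = 0 := by
      simp [List.findIdx_cons]
    rw [h0, h0', hfi] at hscan
    simp only [List.nil_append, List.length_cons, List.length_nil, Nat.zero_add] at hscan
    have hmax : PySem.List.max? (x :: rest) (fun y => y) = some (pvMaxOf x rest) :=
      PySem.List.max?_id_cons x rest
    have hmin : PySem.List.min? (x :: rest) (fun y => y) = some (pvMinOf x rest) :=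
      PySem.List.min?_id_cons x rest
    have hk := pvScanIdxA_eq_findIdx (x :: rest) (pvMaxOf x rest) (pvMaxOf_mem x rest)
    have hj := pvScanIdxA_eq_findIdx (x :: rest) (pvMinOf x rest) (pvMinOf_mem x rest)
    rw [intercambiarMM, intercambiarMM_alt, if_pos (by simp), hmax, hmin, hscan]
    show ((x :: rest).set (pvScanIdxA (x :: rest) (pvMaxOf x rest)) (pvMinOf x rest)).set
          (pvScanIdxA (x :: rest) (pvMinOf x rest)) (pvMaxOf x rest)
       = ((x :: rest).set (List.findIdx (fun v => decide (v = pvMaxOf x rest)) (x :: rest)) (pvMinOf x rest)).set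
          (List.findIdx (fun v => decide (v = pvMinOf x rest)) (x :: rest)) (pvMaxOf x rest)
    rw [hk, hj]
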